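-- pv_equiv track=rewrite | github.com/RMA1403/Algeo02-21057 | src/Covarian.py | CovarianBase
-- ===== SOURCE A (Python) =====
-- def CovarianBase(X):
--
--     row1 = len(X)
--     col1 = len(X[0])
--
--     Y = [[0 for i in range(row1)] for j in range(col1)]
--
--     for r in range(col1):
--         for c in range(row1):
--             Y[r][c] = X[c][r]
--
--     row2 = len(Y)
--     col2 = len(Y[0])
--
--     Covarian = [[0 for i in range(col2)] for j in range(row1)]
--
--     for k in range(row1):
--         for l in range(col2):
--             sum = 0
--             for m in range(row2):
--                 sum += X[k][m] * Y[m][l]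
--             Covarian[k][l] = sum
--
--     return Covarian
-- ===== SOURCE B (Python) =====
-- def CovarianBase(X):
--     row1 = len(X)
--     col1 = len(X[0])
--     dots = {}
--     for k in range(row1):
--         for l in range(k, row1):
--             s = 0
--             for t in range(col1):
--                 s += X[k][t] * X[l][t]
--             dots[(k, l)] = s
--     return [[dots[(min(k, l), max(k, l))] for l in range(row1)] for k in range(row1)]
-- ===== Notes on version B (the rewrite author's own statement) =====
-- stated objective: faster
-- what changed: B drops the explicit transpose pass and exploits Gram-matrix symmetry: it computes only the upper-triangle dot products k<=l into a dict and fills the full matrix by symmetric lookup, instead of A's transpose build plus full n*n triple loop.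
import Mathlib
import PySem

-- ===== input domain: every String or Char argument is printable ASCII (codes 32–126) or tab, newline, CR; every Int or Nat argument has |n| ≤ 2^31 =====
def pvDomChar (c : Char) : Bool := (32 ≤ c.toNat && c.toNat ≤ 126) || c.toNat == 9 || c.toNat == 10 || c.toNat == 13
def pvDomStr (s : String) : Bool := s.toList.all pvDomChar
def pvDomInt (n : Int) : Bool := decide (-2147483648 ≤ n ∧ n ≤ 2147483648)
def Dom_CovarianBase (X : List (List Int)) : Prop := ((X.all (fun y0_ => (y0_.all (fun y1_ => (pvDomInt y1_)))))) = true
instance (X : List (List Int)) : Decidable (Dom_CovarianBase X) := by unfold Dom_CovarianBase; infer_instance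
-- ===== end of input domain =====

-- B computes only the upper-triangle dot products into a dict and mirrors them by symmetry (about half the dot products, no transpose pass; objective: faster),
-- instead of A's explicit transpose build followed by the full n*n triple loop.

-- ===== PORT A =====
def CovarianBase (X : List (List Int)) : List (List Int) :=
  let row1 := X.length
  let col1 := (X.headD []).length
  let Y := (List.range col1).map (fun r => (List.range row1).map (fun c => (X.getD c []).getD r 0))
  let row2 := Y.length
  let col2 := (Y.headD []).length
  (List.range row1).map (fun k =>
    (List.range col2).map (fun l =>
      (List.range row2).foldl (fun s m => s + (X.getD k []).getD m 0 * (Y.getD m []).getD l 0) 0))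

-- ===== PORT B =====
def CovarianBase_alt (X : List (List Int)) : List (List Int) :=
  let row1 := X.length
  let col1 := (X.headD []).length
  let dots : PySem.Dict (Nat × Nat) Int :=
    (List.range row1).foldl (fun d k =>
      (List.range' k (row1 - k)).foldl (fun d l =>
        d.insert (k, l)
          ((List.range col1).foldl (fun s t => s + (X.getD k []).getD t 0 * (X.getD l []).getD t 0) 0)) d)
      PySem.Dict.empty
  (List.range row1).map (fun k =>
    (List.range row1).map (fun l => dots.getD (min k l, max k l) 0))

-- ===== PRECONDITION & SPEC =====
-- Pre_ excludes exactly the inputs where the Python A raises IndexError: empty X, empty first row,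
-- or a row shorter than the first row (X[c][r] out of range in the transpose loop).
def Pre_CovarianBase (X : List (List Int)) : Prop :=
  X ≠ [] ∧ 0 < (X.headD []).length ∧ ∀ row ∈ X, (X.headD []).length ≤ row.length
instance (X : List (List Int)) : Decidable (Pre_CovarianBase X) := by unfold Pre_CovarianBase; infer_instance
def pvWitness_CovarianBase : List (List Int) := [[1, 2], [3, 4]]
def Spec_CovarianBase (X : List (List Int)) (out : List (List Int)) : Prop := out = CovarianBase_alt X
instance (X : List (List Int)) (out : List (List Int)) : Decidable (Spec_CovarianBase X out) := by unfold Spec_CovarianBase; infer_instance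

-- ===== CLAIM (what is proved, stated in full; the proofs are below) =====
def Claim_equal_CovarianBase : Prop := ∀ (X : List (List Int)), Dom_CovarianBase X → Pre_CovarianBase X → Spec_CovarianBase X (CovarianBase X)

-- ===== LEMMAS AND PROOFS =====

-- the dot product of rows k and l over the first `m` columns
def pvDot (X : List (List Int)) (m k l : Nat) : Int :=
  (List.range m).foldl (fun s t => s + (X.getD k []).getD t 0 * (X.getD l []).getD t 0) 0

theorem pvDot_def (X : List (List Int)) (m k l : Nat) :
    (List.range m).foldl (fun s t => s + (X.getD k []).getD t 0 * (X.getD l []).getD t 0) 0 = pvDot X m k l := rfl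

theorem pvDot_comm (X : List (List Int)) (m k l : Nat) : pvDot X m k l = pvDot X m l k := by
  unfold pvDot
  congr 1
  funext s t
  ring

-- inner-loop characterisation of B's dict build
theorem pvInner_get? (X : List (List Int)) (m k0 : Nat) :
    ∀ (c s : Nat) (d : PySem.Dict (Nat × Nat) Int) (a b : Nat),
    ((List.range' s c).foldl (fun d l => d.insert (k0, l) (pvDot X m k0 l)) d).get? (a, b)
      = if a = k0 ∧ s ≤ b ∧ b < s + c then some (pvDot X m a b) else d.get? (a, b) := by
  intro c
  induction c with
  | zero =>
    intro s d a b
    simp only [List.range'_zero, List.foldl_nil]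
    rw [if_neg]; rintro ⟨_, h2, h3⟩; omega
  | succ c ih =>
    intro s d a b
    rw [List.range'_succ, List.foldl_cons, ih, PySem.Dict.get?_insert]
    by_cases h1 : a = k0 ∧ s + 1 ≤ b ∧ b < s + 1 + c
    · rw [if_pos h1, if_pos (by obtain ⟨x, y, z⟩ := h1; exact ⟨x, by omega, by omega⟩)]
    · rw [if_neg h1]
      by_cases he : (a, b) = ((k0, s) : Nat × Nat)
      · rw [if_pos he, Prod.mk.injEq] at *
        obtain ⟨x, y⟩ := he; subst x; subst y
        rw [if_pos ⟨rfl, le_refl _, by omega⟩]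
      · rw [if_neg he, if_neg]
        rintro ⟨x, y, z⟩
        subst x
        rcases Nat.eq_or_lt_of_le y with hb | hb
        · exact he (by rw [← hb])
        · exact h1 ⟨rfl, hb, by omega⟩

-- outer-loop characterisation of B's dict build
theorem pvOuter_get? (X : List (List Int)) (m n : Nat) :
    ∀ (c s : Nat), s + c ≤ n → ∀ (d : PySem.Dict (Nat × Nat) Int) (a b : Nat),
    ((List.range' s c).foldl (fun d k =>
        (List.range' k (n - k)).foldl (fun d l => d.insert (k, l) (pvDot X m k l)) d) d).get? (a, b)
      = if s ≤ a ∧ a < s + c ∧ a ≤ b ∧ b < n then some (pvDot X m a b) else d.get? (a, b) := by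
  intro c
  induction c with
  | zero =>
    intro s _ d a b
    simp only [List.range'_zero, List.foldl_nil]
    rw [if_neg]; rintro ⟨_, h2, _⟩; omega
  | succ c ih =>
    intro s hs d a b
    rw [List.range'_succ, List.foldl_cons, ih _ (by omega), pvInner_get?]
    by_cases h1 : s + 1 ≤ a ∧ a < s + 1 + c ∧ a ≤ b ∧ b < n
    · rw [if_pos h1, if_pos (by omega)]
    · rw [if_neg h1]
      by_cases h2 : a = s ∧ s ≤ b ∧ b < s + (n - s)
      · rw [if_pos h2, if_pos (by omega)]
      · rw [if_neg h2, if_neg (by omega)]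

theorem pvDots_getD (X : List (List Int)) (m n a b : Nat) (hab : a ≤ b) (hb : b < n) :
    (((List.range n).foldl (fun d k =>
        (List.range' k (n - k)).foldl (fun d l => d.insert (k, l) (pvDot X m k l)) d)
        PySem.Dict.empty).getD (a, b) 0) = pvDot X m a b := by
  rw [PySem.Dict.getD_eq_get?_getD, List.range_eq_range', pvOuter_get? X m n n 0 (by omega)]
  rw [if_pos ⟨Nat.zero_le a, by omega, hab, hb⟩]
  rfl

-- ===== VERDICT (by name: the statement is the Claim_ definition above) =====
theorem CovarianBase_spec : Claim_equal_CovarianBase := by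
  intro X _ ⟨hne, hcol, hrows⟩
  show CovarianBase X = CovarianBase_alt X
  unfold CovarianBase CovarianBase_alt
  simp only []
  set n := X.length with hn
  set m := (X.headD []).length with hm
  have hn0 : 0 < n := by cases X with | nil => exact absurd rfl hne | cons h t => simp [hn]
  -- the transpose Y
  set Y := (List.range m).map (fun r => (List.range n).map (fun c => (X.getD c []).getD r 0)) with hY
  have hYlen : Y.length = m := by simp [hY]
  have hYhead : (Y.headD []).length = n := by
    cases hm' : m with
    | zero => omega
    | succ m' => simp [hY, hm', List.range_succ_eq_map]
  have hYget : ∀ t, t < m → Y.getD t [] = (List.range n).map (fun c => (X.getD c []).getD t 0) := by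
    intro t ht
    rw [hY, List.getD_eq_getElem?_getD, List.getElem?_map, List.getElem?_range ht]
    rfl
  rw [hYlen, hYhead]
  apply List.map_congr_left
  intro k hk
  rw [List.mem_range] at hk
  apply List.map_congr_left
  intro l hl
  rw [List.mem_range] at hl
  simp only [pvDot_def]
  rw [pvDots_getD X m n (min k l) (max k l) (min_le_max) (by omega)]
  have hsum : (List.range m).foldl (fun s t => s + (X.getD k []).getD t 0 * ((Y.getD t []).getD l 0)) 0
      = pvDot X m k l := by
    unfold pvDot
    apply PySem.List.foldl_congr_mem
    intro s t ht
    rw [List.mem_range] at ht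
    rw [hYget t ht]
    simp [List.getD_eq_getElem?_getD, List.getElem?_range hl]
  rw [hsum]
  rcases Nat.le_total k l with h | h
  · rw [Nat.min_eq_left h, Nat.max_eq_right h]
  · rw [Nat.min_eq_right h, Nat.max_eq_left h, pvDot_comm]
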